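-- pv_equiv track=rewrite | github.com/charlesmurphy1/graphinf | graphinf/graph/util.py | reduce_partition
-- ===== SOURCE A (Python) =====
-- def reduce_partition(partition):
--     reduced = []
--     mapping = []
--     if not isinstance(partition[0], list):
--         partition = [partition]
--     for i, bb in enumerate(partition):
--         reduced.append([])
--         mapping.append(dict())
--
--         inverse = (
--             None if i == 0 else {v: k for k, v in mapping[i - 1].items()}
--         )
--         idx = 0
--         for j, _bb in enumerate(bb):
--             if inverse is not None and j not in inverse:
--                 continue
--             if _bb not in mapping[i]:
--                 mapping[i][_bb] = idx
--                 idx += 1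
--             if inverse is None:
--                 reduced[i].append(mapping[i][_bb])
--             else:
--                 reduced[i].append(mapping[i][_bb])
--         if len(reduced[i]) == 1:
--             break
--     return reduced
-- ===== SOURCE B (Python) =====
-- def reduce_partition(partition):
--     if not isinstance(partition[0], list):
--         partition = [partition]
--
--     def relabel(bb):
--         # label of x = number of distinct values before x's first occurrence
--         return [len(set(bb[:bb.index(x)])) for x in bb]
--
--     def go(levels, limit):
--         if not levels:
--             return []
--         bb = levels[0] if limit is None else levels[0][:limit]
--         lvl = relabel(bb)
--         if len(lvl) == 1:
--             return [lvl]
--         return [lvl] + go(levels[1:], len(set(bb)))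
--
--     return go(partition, None)
-- ===== Notes on version B (the rewrite author's own statement) =====
-- stated objective: alternative
-- what changed: B uses no mapping/inverse dicts at all: each label is computed directly as the number of distinct values before the element's first occurrence (len(set(bb[:bb.index(x)]))), levels are truncated by a slice to the previous level's distinct count, and the outer loop becomes recursion; this trades A's linear dict passes for a direct quadratic per-level formula.
-- outside the precondition, e.g. on reduce_partition([]): A raises IndexError, B raises IndexError
import Mathlib
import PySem

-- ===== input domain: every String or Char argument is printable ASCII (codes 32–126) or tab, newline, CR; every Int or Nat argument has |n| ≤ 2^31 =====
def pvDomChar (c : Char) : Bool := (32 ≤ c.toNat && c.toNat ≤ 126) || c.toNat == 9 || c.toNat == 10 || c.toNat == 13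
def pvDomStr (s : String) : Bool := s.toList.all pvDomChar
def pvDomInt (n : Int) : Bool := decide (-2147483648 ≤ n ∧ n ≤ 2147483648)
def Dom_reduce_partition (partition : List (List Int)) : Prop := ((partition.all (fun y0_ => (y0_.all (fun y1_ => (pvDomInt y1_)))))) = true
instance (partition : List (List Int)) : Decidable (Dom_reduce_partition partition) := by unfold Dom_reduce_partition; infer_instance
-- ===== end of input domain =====

-- B drops A's mapping/inverse dicts entirely: each label is the number of distinct values
-- before the element's first occurrence, levels are truncated with a slice to the previous
-- level's distinct count, and the outer loop is recursion (objective: alternative).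
-- Neither program mutates its argument.

-- ===== PORT A =====
-- In the typed domain List (List Int), `isinstance(partition[0], list)` is always true,
-- so A's flat-to-nested wrap never fires; `partition[0]` on [] is an IndexError (excluded by Pre_).
-- Inner loop of A: state (mapping[i], idx, reduced[i]); inv? = none exactly when i == 0.
def pvInnerA (inv? : Option (PySem.Dict Int Int)) :
    List (Int × Int) → PySem.Dict Int Int × Int × List Int → PySem.Dict Int Int × Int × List Int
  | [], st => st
  | (j, x) :: rest, (m, idx, acc) =>
    if (match inv? with | some inv => !(inv.contains j) | none => false) then
      pvInnerA inv? rest (m, idx, acc)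
    else
      let p := if m.contains x then (m, idx) else (m.insert x idx, idx + 1)
      -- Python appends mapping[i][_bb] (identically in both `inverse` branches); the key is
      -- guaranteed present after the insert, so d[k] is exact as getD _ _ 0 here.
      pvInnerA inv? rest (p.1, p.2, acc ++ [p.1.getD x 0])

-- inverse = {v: k for k, v in mapping[i-1].items()}
def pvInvert (m : PySem.Dict Int Int) : PySem.Dict Int Int :=
  m.items.foldl (fun d kv => d.insert kv.2 kv.1) PySem.Dict.empty

-- outer loop; prev? carries mapping[i-1] (none for i == 0); `break` = stop recursing
def pvLevelsA : Option (PySem.Dict Int Int) → List (List Int) → List (List Int)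
  | _, [] => []
  | prev?, bb :: rest =>
    let inv? := prev?.map pvInvert
    let st := pvInnerA inv? (PySem.List.enumerate bb) (PySem.Dict.empty, 0, [])
    if st.2.2.length = 1 then [st.2.2] else st.2.2 :: pvLevelsA (some st.1) rest

def reduce_partition (partition : List (List Int)) : List (List Int) :=
  pvLevelsA none partition

-- ===== PORT B =====
-- relabel(bb) = [len(set(bb[:bb.index(x)])) for x in bb]; x ∈ bb always, so bb.index(x)
-- never raises and index? … |>.getD 0 is exact.
def pvRelabelB (bb : List Int) : List Int :=
  bb.map (fun x =>
    ((PySem.Set.ofList (PySem.List.slice bb none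
        (some (((PySem.List.index? bb x).getD 0 : Nat) : Int)))).length : Int))

-- go(levels, limit); limit = None initially, afterwards len(set(bb)) of the previous level
def pvLevelsB : Option Int → List (List Int) → List (List Int)
  | _, [] => []
  | limit?, bb0 :: rest =>
    let bb := match limit? with | none => bb0 | some c => PySem.List.slice bb0 none (some c)
    let lvl := pvRelabelB bb
    if lvl.length = 1 then [lvl]
    else lvl :: pvLevelsB (some (((PySem.Set.ofList bb).length : Nat) : Int)) rest

def reduce_partition_alt (partition : List (List Int)) : List (List Int) :=
  pvLevelsB none partition

-- ===== PRECONDITION & SPEC =====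
-- A evaluates partition[0]; on the empty list this is an IndexError, so Pre_ excludes only [].
def Pre_reduce_partition (partition : List (List Int)) : Prop := partition ≠ []
instance (partition : List (List Int)) : Decidable (Pre_reduce_partition partition) := by
  unfold Pre_reduce_partition; infer_instance
def pvWitness_reduce_partition : List (List Int) := [[1, 2, 1], [5, 5, 7], [9]]

def Spec_reduce_partition (partition : List (List Int)) (out : List (List Int)) : Prop := out = reduce_partition_alt partition
instance (partition : List (List Int)) (out : List (List Int)) : Decidable (Spec_reduce_partition partition out) := by unfold Spec_reduce_partition; infer_instance

-- ===== CLAIM (what is proved, stated in full; the proofs are below) =====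
def Claim_equal_reduce_partition : Prop := ∀ (partition : List (List Int)), Dom_reduce_partition partition → Pre_reduce_partition partition → Spec_reduce_partition partition (reduce_partition partition)

-- ===== LEMMAS AND PROOFS =====

-- helper: the dict {S[i] : i} built by inserting fresh keys in order
def pvDictOf (S : List Int) : PySem.Dict Int Int :=
  (PySem.List.enumerate S).foldl (fun d p => d.insert p.2 p.1) PySem.Dict.empty

theorem pvDictOf_append (S : List Int) (x : Int) :
    pvDictOf (S ++ [x]) = (pvDictOf S).insert x (S.length : Int) := by
  simp [pvDictOf, PySem.List.enumerate_append, List.foldl_append, PySem.List.enumerate_cons,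
    PySem.List.enumerate_nil]

theorem contains_pvDictOf (S : List Int) (x : Int) :
    (pvDictOf S).contains x = decide (x ∈ S) := by
  simp [pvDictOf, PySem.Dict.contains_eq_decide_mem_keys, PySem.Dict.keys_foldl_insert_key,
    PySem.List.map_snd_enumerate]

theorem getD_pvDictOf (S : List Int) (hnd : S.Nodup) (x : Int) (hx : x ∈ S) :
    (pvDictOf S).getD x 0 = ((S.idxOf x : Nat) : Int) := by
  induction S using List.reverseRecOn with
  | nil => cases hx
  | append_singleton T y IH =>
    have hTy : T.Nodup ∧ y ∉ T := by
      rw [List.nodup_append] at hnd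
      exact ⟨hnd.1, fun h => hnd.2.2 y h y (by simp) rfl⟩
    rw [pvDictOf_append]
    by_cases hxy : x = y
    · subst hxy
      rw [PySem.Dict.getD_insert_self]
      simp [List.idxOf_append, hTy.2]
    · rw [PySem.Dict.getD_insert_of_ne _ _ _ hxy]
      have hxT : x ∈ T := by
        rcases List.mem_append.mp hx with h | h
        · exact h
        · simp at h; exact absurd h hxy
      rw [IH hTy.1 hxT, List.idxOf_append_of_mem hxT]

theorem items_pvDictOf (S : List Int) (hnd : S.Nodup) :
    (pvDictOf S).items = (PySem.List.enumerate S).map (fun p => (p.2, p.1)) := by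
  have := PySem.Dict.items_foldl_insert_fresh (l := PySem.List.enumerate S)
    (k := fun p => p.2) (v := fun p => p.1) (d := PySem.Dict.empty)
    (by intro a _; rfl) (by simpa [PySem.List.map_snd_enumerate] using hnd)
  simpa [pvDictOf] using this

theorem pvUpdate_extends (l seen : List Int) : ∃ t, PySem.Set.update seen l = seen ++ t := by
  induction l generalizing seen with
  | nil => exact ⟨[], by simp [PySem.Set.update]⟩
  | cons x l IH =>
    show ∃ t, PySem.Set.update (PySem.Set.add seen x) l = seen ++ t
    by_cases hx : x ∈ seen
    · rw [PySem.Set.add_of_mem hx]; exact IH seen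
    · rcases IH (seen ++ [x]) with ⟨t, ht⟩
      exact ⟨[x] ++ t, by rw [PySem.Set.add_of_not_mem hx, ht, List.append_assoc]⟩

theorem pvIdxOf_update (l seen : List Int) (x : Int) (hx : x ∈ seen) :
    (PySem.Set.update seen l).idxOf x = seen.idxOf x := by
  rcases pvUpdate_extends l seen with ⟨t, ht⟩
  rw [ht, List.idxOf_append_of_mem hx]

theorem pvNodup_append_singleton (seen : List Int) (x : Int) (hnd : seen.Nodup) (hx : x ∉ seen) :
    (seen ++ [x]).Nodup := by
  rw [List.nodup_append]
  refine ⟨hnd, List.nodup_singleton x, ?_⟩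
  intro a ha b hb
  simp at hb
  subst hb
  exact fun h => hx (h ▸ ha)

theorem pvInnerA_none (bb : List Int) (seen acc : List Int) (s : Int) (hnd : seen.Nodup) :
    pvInnerA none (PySem.List.enumerate bb s) (pvDictOf seen, (seen.length : Int), acc)
      = (pvDictOf (PySem.Set.update seen bb), ((PySem.Set.update seen bb).length : Int),
         acc ++ bb.map (fun x => (((PySem.Set.update seen bb).idxOf x : Nat) : Int))) := by
  induction bb generalizing seen acc s with
  | nil => simp [pvInnerA, PySem.List.enumerate_nil, PySem.Set.update]
  | cons x rest IH =>
    rw [PySem.List.enumerate_cons]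
    have hupd : PySem.Set.update seen (x :: rest) = PySem.Set.update (PySem.Set.add seen x) rest := rfl
    by_cases hx : x ∈ seen
    · have hc : (pvDictOf seen).contains x = true := by
        rw [contains_pvDictOf]; simpa using hx
      have hstep : pvInnerA none ((s, x) :: PySem.List.enumerate rest (s + 1))
          (pvDictOf seen, (seen.length : Int), acc)
          = pvInnerA none (PySem.List.enumerate rest (s + 1))
              (pvDictOf seen, (seen.length : Int), acc ++ [(pvDictOf seen).getD x 0]) := by
        simp [pvInnerA, hc]
      rw [hstep, getD_pvDictOf seen hnd x hx, IH seen _ _ hnd, hupd, PySem.Set.add_of_mem hx]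
      have hidx : (PySem.Set.update seen rest).idxOf x = seen.idxOf x :=
        pvIdxOf_update rest seen x hx
      simp [hidx]
    · have hc : (pvDictOf seen).contains x = false := by
        rw [contains_pvDictOf]; simpa using hx
      have hnd' : (seen ++ [x]).Nodup := pvNodup_append_singleton seen x hnd hx
      have hlen1 : ((seen.length : Int) + 1) = (((seen ++ [x]).length : Nat) : Int) := by
        simp
      have hstep : pvInnerA none ((s, x) :: PySem.List.enumerate rest (s + 1))
          (pvDictOf seen, (seen.length : Int), acc)
          = pvInnerA none (PySem.List.enumerate rest (s + 1))
              (pvDictOf (seen ++ [x]), ((seen ++ [x]).length : Int),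
               acc ++ [(pvDictOf (seen ++ [x])).getD x 0]) := by
        simp only [pvInnerA, hc, Bool.false_eq_true, if_false]
        rw [← hlen1, pvDictOf_append]
      rw [hstep, IH (seen ++ [x]) _ _ hnd', hupd, PySem.Set.add_of_not_mem hx]
      have hmem : x ∈ seen ++ [x] := by simp
      have hidx : (PySem.Set.update (seen ++ [x]) rest).idxOf x = (seen ++ [x]).idxOf x :=
        pvIdxOf_update rest (seen ++ [x]) x hmem
      rw [getD_pvDictOf (seen ++ [x]) hnd' x hmem]
      simp [hidx]

theorem contains_pvInvert (S : List Int) (hnd : S.Nodup) (j : Int) :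
    (pvInvert (pvDictOf S)).contains j = decide (0 ≤ j ∧ j < (S.length : Int)) := by
  rw [pvInvert, items_pvDictOf S hnd, List.foldl_map]
  rw [PySem.Dict.contains_eq_decide_mem_keys]
  have hkeys : (((PySem.List.enumerate S).foldl
      (fun d p => d.insert p.1 p.2) PySem.Dict.empty)).keys
      = PySem.Set.ofList (PySem.List.pyRange 0 (S.length : Int) 1) := by
    have := PySem.Dict.keys_foldl_insert_key (l := PySem.List.enumerate S)
      (key := fun p => p.1) (f := fun _ p => p.2) (d := PySem.Dict.empty)
    simpa [PySem.List.map_fst_enumerate, PySem.List.len_eq] using this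
  rw [hkeys, PySem.Set.ofList_eq_self_of_nodup _ (PySem.List.nodup_pyRange_one 0 _)]
  simp [PySem.List.mem_pyRange_one]

theorem pvInnerA_skip (bb : List Int) (k n : Nat) (inv : PySem.Dict Int Int)
    (st : PySem.Dict Int Int × Int × List Int)
    (hinv : ∀ j : Int, inv.contains j = decide (0 ≤ j ∧ j < (n : Int))) :
    pvInnerA (some inv) (PySem.List.enumerate bb (k : Int)) st
      = pvInnerA none (PySem.List.enumerate (bb.take (n - k)) (k : Int)) st := by
  induction bb generalizing k st with
  | nil => simp [PySem.List.enumerate_nil, pvInnerA]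
  | cons x rest IH =>
    rw [PySem.List.enumerate_cons]
    have hcast : (k : Int) + 1 = ((k + 1 : Nat) : Int) := by push_cast; ring
    by_cases hk : k < n
    · have hc : inv.contains (k : Int) = true := by
        rw [hinv]; simp; omega
      have htake : (x :: rest).take (n - k) = x :: rest.take (n - (k + 1)) := by
        have h1 : n - k = (n - (k + 1)) + 1 := by omega
        rw [h1, List.take_succ_cons]
      rw [htake, PySem.List.enumerate_cons]
      simp only [pvInnerA, hc, Bool.not_true, Bool.false_eq_true, if_false]
      rw [hcast, IH (k + 1) _]
    · have hc : inv.contains (k : Int) = false := by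
        rw [hinv]; simp; omega
      have htake : (x :: rest).take (n - k) = [] := by
        have h1 : n - k = 0 := by omega
        simp [h1]
      have htake' : rest.take (n - (k + 1)) = [] := by
        have h1 : n - (k + 1) = 0 := by omega
        simp [h1]
      rw [htake]
      simp only [pvInnerA, hc, Bool.not_false, if_pos]
      rw [hcast, IH (k + 1) st, htake']
      simp [PySem.List.enumerate_nil, pvInnerA]

-- B's label formula: distinct count before first occurrence = rank in first-occurrence order
theorem pvKey (bb : List Int) (seen : List Int) (x : Int) (hx : x ∈ bb) (hxs : x ∉ seen) :
    (PySem.Set.update seen (bb.take (bb.idxOf x))).length = (PySem.Set.update seen bb).idxOf x := by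
  induction bb generalizing seen with
  | nil => cases hx
  | cons y rest IH =>
    have hupd : ∀ l, PySem.Set.update seen (y :: l) = PySem.Set.update (PySem.Set.add seen y) l :=
      fun _ => rfl
    by_cases hyx : y = x
    · subst hyx
      rw [List.idxOf_cons_self, List.take_zero]
      show seen.length = (PySem.Set.update seen (y :: rest)).idxOf y
      rw [hupd rest, PySem.Set.add_of_not_mem hxs,
        pvIdxOf_update rest (seen ++ [y]) y (by simp), List.idxOf_append, if_neg hxs]
      simp
    · have hne : x ≠ y := fun h => hyx h.symm
      rw [List.idxOf_cons_ne _ hyx, List.take_succ_cons, hupd, hupd]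
      by_cases hy : y ∈ seen
      · rw [PySem.Set.add_of_mem hy]
        exact IH seen (List.mem_of_ne_of_mem hne hx) hxs
      · rw [PySem.Set.add_of_not_mem hy]
        exact IH (seen ++ [y]) (List.mem_of_ne_of_mem hne hx) (by simp [hxs, hne])

theorem pvIndex?_mem (bb : List Int) (x : Int) (hx : x ∈ bb) :
    PySem.List.index? bb x = some (bb.idxOf x) := by
  induction bb with
  | nil => cases hx
  | cons y rest IH =>
    by_cases hyx : y = x
    · subst hyx
      rw [PySem.List.index?_cons_self, List.idxOf_cons_self]
    · rw [PySem.List.index?_cons_of_ne _ hyx, List.idxOf_cons_ne _ hyx,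
        IH (List.mem_of_ne_of_mem (fun h => hyx h.symm) hx), Option.map_some]

theorem pvRelabelB_eq (bb : List Int) :
    pvRelabelB bb = bb.map (fun x => (((PySem.Set.ofList bb).idxOf x : Nat) : Int)) := by
  unfold pvRelabelB
  apply List.map_congr_left
  intro x hx
  rw [pvIndex?_mem bb x hx, Option.getD_some, PySem.List.slice_to_natCast]
  have h := pvKey bb [] x hx (by simp)
  have hofl : ∀ l : List Int, PySem.Set.update [] l = PySem.Set.ofList l := fun _ => rfl
  rw [hofl, hofl] at h
  exact_mod_cast congrArg (fun n : Nat => (n : Int)) h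

theorem pvLevels_eq (rest : List (List Int)) (S : List Int) (hnd : S.Nodup) :
    pvLevelsA (some (pvDictOf S)) rest = pvLevelsB (some ((S.length : Nat) : Int)) rest := by
  induction rest generalizing S with
  | nil => rfl
  | cons bb rest IH =>
    have hslice : PySem.List.slice bb none (some ((S.length : Nat) : Int)) = bb.take S.length :=
      PySem.List.slice_to_natCast bb S.length
    have hskip := pvInnerA_skip bb 0 S.length (pvInvert (pvDictOf S))
      (PySem.Dict.empty, 0, []) (contains_pvInvert S hnd)
    have hinner := pvInnerA_none (bb.take S.length) [] [] 0 List.nodup_nil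
    simp only [Nat.sub_zero, Nat.cast_zero, List.length_nil, List.nil_append] at hskip hinner
    have hofl : PySem.Set.update [] (bb.take S.length) = PySem.Set.ofList (bb.take S.length) := rfl
    have hempty : pvDictOf [] = PySem.Dict.empty := rfl
    rw [hofl, hempty] at hinner
    set bb' := bb.take S.length with hbb'
    set S' := PySem.Set.ofList bb' with hS'
    have hndS' : S'.Nodup := PySem.Set.nodup_ofList bb'
    simp only [pvLevelsA, pvLevelsB, Option.map_some, hslice, hskip, hinner, pvRelabelB_eq, ← hS']
    by_cases hlen : (bb'.map (fun x => ((S'.idxOf x : Nat) : Int))).length = 1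
    · simp [hlen]
    · simp only [hlen, if_false]
      rw [IH S' hndS']

theorem pv_toplevel (bb : List Int) (rest : List (List Int)) :
    pvLevelsA none (bb :: rest) = pvLevelsB none (bb :: rest) := by
  have hinner := pvInnerA_none bb [] [] 0 List.nodup_nil
  simp only [List.length_nil, Nat.cast_zero, List.nil_append] at hinner
  have hofl : PySem.Set.update [] bb = PySem.Set.ofList bb := rfl
  have hempty : pvDictOf [] = PySem.Dict.empty := rfl
  rw [hofl, hempty] at hinner
  set S := PySem.Set.ofList bb with hS
  have hndS : S.Nodup := PySem.Set.nodup_ofList bb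
  simp only [pvLevelsA, pvLevelsB, Option.map_none, hinner, pvRelabelB_eq, ← hS]
  by_cases hlen : (bb.map (fun x => ((S.idxOf x : Nat) : Int))).length = 1
  · simp [hlen]
  · simp only [hlen, if_false]
    rw [pvLevels_eq rest S hndS]

-- ===== VERDICT (by name: the statement is the Claim_ definition above) =====
theorem reduce_partition_spec : Claim_equal_reduce_partition := by
  intro partition _ hpre
  unfold Spec_reduce_partition
  match partition with
  | [] => exact absurd rfl hpre
  | bb :: rest => exact pv_toplevel bb rest
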